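-- pv_equiv track=rewrite | github.com/mtrejo0/SchoolWork | 6.009/past/q3_practice_solutions/q3_practice_c_sol.py | boundary_indices
-- ===== SOURCE A (Python) =====
-- def boundary_indices(data):
--     """ yield indices whenever label changes """
--     elts = sorted(data)
--     if len(elts) == 0:
--         return
--     prev_label = elts[0][1]
--     for ix, elt in enumerate(elts):
--         if elt[1] != prev_label:
--             prev_label = elt[1]
--             yield ix
-- ===== SOURCE B (Python) =====
-- def boundary_indices(data):
--     """ yield indices whenever label changes """
--     elts = sorted(data)
--     # pass 1: run-length encode the labels of the sorted data
--     runs = []  # list of [label, count]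
--     for e in elts:
--         if runs and runs[-1][0] == e[1]:
--             runs[-1][1] += 1
--         else:
--             runs.append([e[1], 1])
--     # pass 2: yield the cumulative start index of every run after the first
--     pos = 0
--     for label, cnt in runs[:-1]:
--         pos += cnt
--         yield pos
-- ===== Notes on version B (the rewrite author's own statement) =====
-- stated objective: alternative
-- what changed: Replaces the enumerate-with-carried-prev_label scan by a two-pass run-length decomposition: first run-length encode the sorted labels, then yield the cumulative start index of each run after the first.
import Mathlib
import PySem

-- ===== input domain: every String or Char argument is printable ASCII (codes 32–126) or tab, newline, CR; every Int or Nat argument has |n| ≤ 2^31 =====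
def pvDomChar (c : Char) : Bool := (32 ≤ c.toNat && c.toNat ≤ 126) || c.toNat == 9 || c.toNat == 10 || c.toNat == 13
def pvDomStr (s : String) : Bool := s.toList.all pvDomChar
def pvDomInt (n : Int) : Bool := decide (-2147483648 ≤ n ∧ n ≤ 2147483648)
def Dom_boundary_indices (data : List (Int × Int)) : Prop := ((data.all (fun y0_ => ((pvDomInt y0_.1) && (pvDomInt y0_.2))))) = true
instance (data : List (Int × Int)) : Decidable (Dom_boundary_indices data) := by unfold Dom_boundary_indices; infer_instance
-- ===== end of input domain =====

-- B replaces A's enumerate-with-carried-prev_label scan by a two-pass run-length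
-- decomposition (run-length encode the sorted labels, then yield cumulative run starts);
-- objective: alternative (same cost, different algorithm). Return-value equivalence
-- (both Pythons are generators; the yielded sequence is compared).


-- ===== PORT A =====
def boundary_indices (data : List (Int × Int)) : List Int :=
  let elts := PySem.List.sorted2 data Prod.fst Prod.snd
  match elts with
  | [] => []
  | e0 :: _ =>
    ((PySem.List.enumerate elts).foldl
      (fun (st : Int × List Int) (p : Int × (Int × Int)) =>
        if p.2.2 ≠ st.1 then (p.2.2, st.2 ++ [p.1]) else st)
      (e0.2, [])).2

-- ===== PORT B =====
-- one step of the run-length pass: `if runs and runs[-1][0] == e[1]: runs[-1][1] += 1 else: runs.append([e[1], 1])`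
def biStep (runs : List (Int × Int)) (e : Int × Int) : List (Int × Int) :=
  match runs.getLast? with
  | some (lbl, cnt) =>
      if lbl = e.2 then runs.dropLast ++ [(lbl, cnt + 1)] else runs ++ [(e.2, 1)]
  | none => [(e.2, 1)]

def boundary_indices_alt (data : List (Int × Int)) : List Int :=
  let elts := PySem.List.sorted2 data Prod.fst Prod.snd
  let runs := elts.foldl biStep []
  (runs.dropLast.foldl
    (fun (st : Int × List Int) (r : Int × Int) => (st.1 + r.2, st.2 ++ [st.1 + r.2]))
    ((0 : Int), ([] : List Int))).2

-- ===== PRECONDITION & SPEC =====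
def Spec_boundary_indices (data : List (Int × Int)) (out : List Int) : Prop := out = boundary_indices_alt data
instance (data : List (Int × Int)) (out : List Int) : Decidable (Spec_boundary_indices data out) := by unfold Spec_boundary_indices; infer_instance

-- ===== CLAIM (what is proved, stated in full; the proofs are below) =====
def Claim_equal_boundary_indices : Prop := ∀ (data : List (Int × Int)), Dom_boundary_indices data → Spec_boundary_indices data (boundary_indices data)

-- ===== LEMMAS AND PROOFS =====

-- recursive characterisation of A's scan (prev label, next index)
def scanA : Int → Int → List (Int × Int) → List Int
  | _, _, [] => []
  | p, ix, e :: t => if e.2 ≠ p then ix :: scanA e.2 (ix + 1) t else scanA p (ix + 1) t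

-- recursive characterisation of B's second pass
def ys : Int → List (Int × Int) → List Int
  | _, [] => []
  | pos, r :: rs => (pos + r.2) :: ys (pos + r.2) rs

-- total count of a run list
def cnts : List (Int × Int) → Int
  | [] => 0
  | r :: rs => r.2 + cnts rs

lemma cnts_append (xs : List (Int × Int)) (r : Int × Int) :
    cnts (xs ++ [r]) = cnts xs + r.2 := by
  induction xs with
  | nil => simp [cnts]
  | cons x xs ih => simp [cnts, ih]; ring

lemma foldA (t : List (Int × Int)) : ∀ (p ix : Int) (acc : List Int),
    ((PySem.List.enumerate t ix).foldl
      (fun (st : Int × List Int) (q : Int × (Int × Int)) =>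
        if q.2.2 ≠ st.1 then (q.2.2, st.2 ++ [q.1]) else st)
      (p, acc)).2 = acc ++ scanA p ix t := by
  induction t with
  | nil => intro p ix acc; simp [PySem.List.enumerate, scanA]
  | cons e t ih =>
    intro p ix acc
    rw [PySem.List.enumerate_cons, List.foldl_cons, scanA]
    by_cases h : e.2 = p
    · simp only [ne_eq, h, not_true_eq_false, if_false]
      exact ih p (ix + 1) acc
    · simp only [ne_eq, h, not_false_eq_true, if_true]
      rw [ih, List.append_assoc]
      rfl

lemma ysFold (rs : List (Int × Int)) : ∀ (pos : Int) (acc : List Int),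
    (rs.foldl
      (fun (st : Int × List Int) (r : Int × Int) => (st.1 + r.2, st.2 ++ [st.1 + r.2]))
      (pos, acc)).2 = acc ++ ys pos rs := by
  induction rs with
  | nil => intro pos acc; simp [ys]
  | cons r rs ih => intro pos acc; simp [List.foldl, ys, ih]

lemma ys_append (rs : List (Int × Int)) : ∀ (pos : Int) (r : Int × Int),
    ys pos (rs ++ [r]) = ys pos rs ++ [pos + cnts rs + r.2] := by
  induction rs with
  | nil => intro pos r; simp [ys, cnts]
  | cons x rs ih =>
    intro pos r
    simp only [List.cons_append, ys, ih, cnts]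
    have h3 : pos + x.2 + cnts rs + r.2 = pos + (x.2 + cnts rs) + r.2 := by ring
    rw [h3]

lemma foldB (t : List (Int × Int)) : ∀ (runs : List (Int × Int)) (p c : Int),
    ys 0 ((t.foldl biStep (runs ++ [(p, c)])).dropLast)
      = ys 0 runs ++ scanA p (cnts runs + c) t := by
  induction t with
  | nil => intro runs p c; simp [scanA]
  | cons e t ih =>
    intro runs p c
    simp only [List.foldl, scanA]
    by_cases h : e.2 = p
    · have hstep : biStep (runs ++ [(p, c)]) e = runs ++ [(p, c + 1)] := by
        simp [biStep, h]
      rw [hstep, ih, h]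
      simp only [ne_eq, not_true_eq_false, if_false]
      have : cnts runs + c + 1 = cnts runs + (c + 1) := by ring
      rw [this]
    · have hstep : biStep (runs ++ [(p, c)]) e = (runs ++ [(p, c)]) ++ [(e.2, 1)] := by
        have : p ≠ e.2 := fun hh => h hh.symm
        simp [biStep, this]
      rw [hstep, ih, ys_append]
      have h1 : cnts (runs ++ [(p, c)]) = cnts runs + c := cnts_append runs (p, c)
      simp only [ne_eq, h, not_false_eq_true, if_true, h1, List.append_assoc,
        List.singleton_append, zero_add]

-- ===== VERDICT (by name: the statement is the Claim_ definition above) =====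
theorem boundary_indices_spec : Claim_equal_boundary_indices := by
  intro data _
  unfold Spec_boundary_indices boundary_indices boundary_indices_alt
  cases helts : PySem.List.sorted2 data Prod.fst Prod.snd with
  | nil => simp
  | cons e0 t =>
    simp only
    rw [PySem.List.enumerate_cons, List.foldl_cons]
    have h0 : (if e0.2 ≠ e0.2 then (e0.2, ([] : List Int) ++ [(0 : Int)]) else (e0.2, ([] : List Int))) = (e0.2, ([] : List Int)) := by simp
    rw [h0, foldA, ysFold]
    have : (e0 :: t).foldl biStep [] = t.foldl biStep ([] ++ [(e0.2, 1)]) := by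
      simp [List.foldl, biStep]
    rw [this, foldB]
    simp [ys, cnts]
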